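-- pv_equiv track=rewrite | github.com/zysilm-ai/ai-video-producer-skill | scripts/execute_pipeline.py | _compute_scene_status
-- ===== SOURCE A (Python) =====
-- def _compute_scene_status(scene: dict) -> str:
--     """
--     Compute scene status from segment statuses (hierarchical).
--
--     Args:
--         scene: Scene dict with 'segments' list
--
--     Returns:
--         Computed status string
--     """
--     segments = scene.get("segments", [])
--     if not segments:
--         return scene.get("status", "pending")
--
--     statuses = [s.get("status", "pending") for s in segments]
--
--     if all(s == "approved" for s in statuses):
--         return "approved"
--     elif all(s in ["generated", "approved"] for s in statuses):
--         return "generated"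
--     elif any(s == "failed" for s in statuses):
--         return "failed"
--     elif any(s == "in_progress" for s in statuses):
--         return "in_progress"
--     else:
--         return "pending"
-- ===== SOURCE B (Python) =====
-- _STATUS_TABLE = ("approved", "generated", "pending", "in_progress", "failed")
--
--
-- def _rank(st):
--     if st == "approved":
--         return 0
--     if st == "generated":
--         return 1
--     if st == "in_progress":
--         return 3
--     if st == "failed":
--         return 4
--     return 2
--
--
-- def _compute_scene_status(scene: dict) -> str:
--     segments = scene.get("segments", [])
--     if not segments:
--         return scene.get("status", "pending")
--     m = max(_rank(s.get("status", "pending")) for s in segments)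
--     return _STATUS_TABLE[m]
-- ===== Notes on version B (the rewrite author's own statement) =====
-- stated objective: simpler
-- what changed: Replaces A's priority ladder of four all/any scans with a severity lattice: each status maps to a numeric rank, the result is a table lookup at the maximum rank over the segments.
-- outside the precondition, e.g. on _compute_scene_status({'segments': [], 'status': [{'a': 'b'}]}): A returns [{'a': 'b'}], B returns [{'a': 'b'}]
import Mathlib
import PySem

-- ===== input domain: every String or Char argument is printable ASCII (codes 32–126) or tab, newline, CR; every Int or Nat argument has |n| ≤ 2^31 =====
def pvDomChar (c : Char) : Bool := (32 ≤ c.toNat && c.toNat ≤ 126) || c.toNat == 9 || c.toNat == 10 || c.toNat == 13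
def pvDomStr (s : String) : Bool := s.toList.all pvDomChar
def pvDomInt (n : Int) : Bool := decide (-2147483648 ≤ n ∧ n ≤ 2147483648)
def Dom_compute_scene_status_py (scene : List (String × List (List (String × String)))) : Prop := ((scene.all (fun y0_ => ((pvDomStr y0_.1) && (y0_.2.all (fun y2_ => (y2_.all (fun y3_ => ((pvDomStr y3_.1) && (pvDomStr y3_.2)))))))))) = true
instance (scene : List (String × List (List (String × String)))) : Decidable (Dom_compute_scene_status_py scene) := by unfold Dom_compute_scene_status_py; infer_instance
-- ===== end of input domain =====

-- B replaces A's priority ladder of all/any scans by a severity rank per status, a maximum, and a table lookup.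

-- ===== PORT A =====
-- statuses = [s.get("status", "pending") for s in segments]
def pvStatusesA (segments : List (List (String × String))) : List String :=
  segments.map (fun s => (PySem.Dict.mk s).getD "status" "pending")

def compute_scene_status_py (scene : List (String × List (List (String × String)))) : String :=
  let segments := (PySem.Dict.mk scene).getD "segments" []
  if segments = [] then
    -- scene.get("status", "pending"): Pre_ guarantees "status" is absent, so this is the default
    "pending"
  else
    let statuses := pvStatusesA segments
    if statuses.all (fun s => s == "approved") then "approved"
    else if statuses.all (fun s => s == "generated" || s == "approved") then "generated"
    else if statuses.any (fun s => s == "failed") then "failed"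
    else if statuses.any (fun s => s == "in_progress") then "in_progress"
    else "pending"

-- ===== PORT B =====
-- _rank: the severity rank of a status (if-chain, as in Source B)
def pvRankB (st : String) : Nat :=
  if st == "approved" then 0
  else if st == "generated" then 1
  else if st == "in_progress" then 3
  else if st == "failed" then 4
  else 2

def pvTableB : List String := ["approved", "generated", "pending", "in_progress", "failed"]

def compute_scene_status_py_alt (scene : List (String × List (List (String × String)))) : String :=
  let segments := (PySem.Dict.mk scene).getD "segments" []
  if segments = [] then
    "pending"
  else
    -- max(...) over a nonempty generator of Nat ranks: fold of Nat.max with init 0 (ranks ≥ 0, list nonempty, so exact)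
    let m := segments.foldl (fun acc s => Nat.max acc (pvRankB ((PySem.Dict.mk s).getD "status" "pending"))) 0
    -- _STATUS_TABLE[m]: m ≤ 4 always, so the index is in range and the default is never used
    (PySem.List.pyGet? pvTableB (m : Int)).getD "pending"

-- ===== PRECONDITION & SPEC =====
-- Pre_ excludes scenes with empty/absent "segments" but a present "status" key: there A returns
-- scene["status"], a list value, not a String (outside the declared return type).
def Pre_compute_scene_status_py (scene : List (String × List (List (String × String)))) : Prop :=
  (PySem.Dict.mk scene).getD "segments" [] = [] → (PySem.Dict.mk scene).get? "status" = none
instance (scene : List (String × List (List (String × String)))) : Decidable (Pre_compute_scene_status_py scene) := by unfold Pre_compute_scene_status_py; infer_instance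

def pvWitness_compute_scene_status_py : (List (String × List (List (String × String)))) :=
  [("segments", [[("status", "approved")], [("status", "generated")]])]

def Spec_compute_scene_status_py (scene : List (String × List (List (String × String)))) (out : String) : Prop := out = compute_scene_status_py_alt scene
instance (scene : List (String × List (List (String × String)))) (out : String) : Decidable (Spec_compute_scene_status_py scene out) := by unfold Spec_compute_scene_status_py; infer_instance

-- ===== CLAIM (what is proved, stated in full; the proofs are below) =====
def Claim_equal_compute_scene_status_py : Prop := ∀ (scene : List (String × List (List (String × String)))), Dom_compute_scene_status_py scene → Pre_compute_scene_status_py scene → Spec_compute_scene_status_py scene (compute_scene_status_py scene)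

-- ===== LEMMAS AND PROOFS =====

theorem foldl_max_init_le (l : List Nat) (a : Nat) : a ≤ l.foldl Nat.max a := by
  induction l generalizing a with
  | nil => simp
  | cons x xs ih => exact le_trans (Nat.le_max_left a x) (ih _)

theorem foldl_max_mem_le (l : List Nat) (a x : Nat) (hx : x ∈ l) : x ≤ l.foldl Nat.max a := by
  induction l generalizing a with
  | nil => cases hx
  | cons y ys ih =>
    rcases List.mem_cons.mp hx with h | h
    · subst h; exact le_trans (Nat.le_max_right a x) (foldl_max_init_le _ _)
    · exact ih _ h

theorem foldl_max_cases (l : List Nat) (a : Nat) :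
    l.foldl Nat.max a = a ∨ l.foldl Nat.max a ∈ l := by
  induction l generalizing a with
  | nil => left; rfl
  | cons y ys ih =>
    rcases ih (Nat.max a y) with h | h
    · simp only [List.foldl_cons] at *
      rcases max_choice a y with hm | hm
      · left; rw [h]; exact hm
      · right; rw [h]; have h2 : a.max y = y := hm; rw [h2]; exact List.mem_cons_self
    · right; exact List.mem_cons_of_mem _ h

theorem pvRank_le_four (s : String) : pvRankB s ≤ 4 := by
  unfold pvRankB; split_ifs <;> omega

theorem pvRank_eq_zero (s : String) : pvRankB s = 0 ↔ s = "approved" := by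
  unfold pvRankB; split_ifs with h1 h2 h3 h4 <;> simp_all

theorem pvRank_le_one (s : String) : pvRankB s ≤ 1 ↔ (s = "approved" ∨ s = "generated") := by
  unfold pvRankB; split_ifs with h1 h2 h3 h4 <;> simp_all

theorem pvRank_eq_three (s : String) : pvRankB s = 3 ↔ s = "in_progress" := by
  unfold pvRankB; split_ifs with h1 h2 h3 h4 <;> simp_all

theorem pvRank_eq_four (s : String) : pvRankB s = 4 ↔ s = "failed" := by
  unfold pvRankB; split_ifs with h1 h2 h3 h4 <;> simp_all

-- B's inner fold, rewritten over A's statuses list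
theorem foldB_as_ranks (segments : List (List (String × String))) :
    segments.foldl (fun acc s => Nat.max acc (pvRankB ((PySem.Dict.mk s).getD "status" "pending"))) 0
      = ((pvStatusesA segments).map pvRankB).foldl Nat.max 0 := by
  simp [pvStatusesA, List.foldl_map]

-- ===== VERDICT (by name: the statement is the Claim_ definition above) =====
theorem compute_scene_status_py_spec : Claim_equal_compute_scene_status_py := by
  intro scene _ hpre
  unfold Spec_compute_scene_status_py compute_scene_status_py compute_scene_status_py_alt
  set segments := (PySem.Dict.mk scene).getD "segments" [] with hseg
  by_cases hne : segments = []
  · simp [hne]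
  · simp only [hne, if_false]
    rw [foldB_as_ranks]
    set ss := pvStatusesA segments with hss
    set rl := ss.map pvRankB with hrl
    set M := rl.foldl Nat.max 0 with hM
    have hub : ∀ x ∈ rl, x ≤ M := fun x hx => foldl_max_mem_le _ _ _ hx
    have hmem : M = 0 ∨ M ∈ rl := foldl_max_cases _ _
    have hM4 : M ≤ 4 := by
      rcases hmem with h | h
      · omega
      · rcases List.mem_map.mp h with ⟨s, _, hs⟩
        rw [← hs]; exact pvRank_le_four s
    have hubs : ∀ s ∈ ss, pvRankB s ≤ M := by
      intro s hs; exact hub _ (List.mem_map.mpr ⟨s, hs, rfl⟩)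
    interval_cases M
    · -- M = 0 : every status is "approved"
      have hall : ss.all (fun s => s == "approved") = true := by
        simp only [List.all_eq_true, beq_iff_eq]
        intro s hs
        exact (pvRank_eq_zero s).mp (Nat.le_zero.mp (hubs s hs))
      rw [if_pos hall]; rfl
    · -- M = 1 : all in {approved, generated}, some "generated"
      have hall2 : ss.all (fun s => s == "generated" || s == "approved") = true := by
        simp only [List.all_eq_true, Bool.or_eq_true, beq_iff_eq]
        intro s hs
        rcases (pvRank_le_one s).mp (hubs s hs) with h | h
        · right; exact h
        · left; exact h
      have hw : ¬ ss.all (fun s => s == "approved") = true := by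
        rcases hmem with h | h
        · omega
        rcases List.mem_map.mp h with ⟨s, hsmem, hs⟩
        intro hall
        have := (List.all_eq_true.mp hall) s hsmem
        rw [beq_iff_eq] at this
        rw [this] at hs
        simp [pvRankB] at hs
      rw [if_neg hw, if_pos hall2]; rfl
    · -- M = 2 : some rank-2 status, none failed / in_progress
      rcases hmem with h | h
      · omega
      rcases List.mem_map.mp h with ⟨w, hwmem, hw⟩
      have hwne : w ≠ "approved" ∧ w ≠ "generated" := by
        constructor <;> intro he <;> rw [he] at hw <;> simp [pvRankB] at hw
      have hall1 : ¬ ss.all (fun s => s == "approved") = true := by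
        intro hall
        have := (List.all_eq_true.mp hall) w hwmem
        exact hwne.1 (beq_iff_eq.mp this)
      have hall2 : ¬ ss.all (fun s => s == "generated" || s == "approved") = true := by
        intro hall
        have := (List.all_eq_true.mp hall) w hwmem
        simp only [Bool.or_eq_true, beq_iff_eq] at this
        rcases this with h' | h'
        · exact hwne.2 h'
        · exact hwne.1 h'
      have hanyf : ¬ ss.any (fun s => s == "failed") = true := by
        intro hany
        rcases List.any_eq_true.mp hany with ⟨s, hsmem, hs⟩
        have := hubs s hsmem
        rw [beq_iff_eq.mp hs] at this
        simp [pvRankB] at this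
      have hanyi : ¬ ss.any (fun s => s == "in_progress") = true := by
        intro hany
        rcases List.any_eq_true.mp hany with ⟨s, hsmem, hs⟩
        have := hubs s hsmem
        rw [beq_iff_eq.mp hs] at this
        simp [pvRankB] at this
      rw [if_neg hall1, if_neg hall2, if_neg hanyf, if_neg hanyi]; rfl
    · -- M = 3 : some "in_progress", none failed
      rcases hmem with h | h
      · omega
      rcases List.mem_map.mp h with ⟨w, hwmem, hw⟩
      have hwip : w = "in_progress" := (pvRank_eq_three w).mp hw
      have hall1 : ¬ ss.all (fun s => s == "approved") = true := by
        intro hall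
        have := (List.all_eq_true.mp hall) w hwmem
        rw [beq_iff_eq.mp this] at hwip; simp at hwip
      have hall2 : ¬ ss.all (fun s => s == "generated" || s == "approved") = true := by
        intro hall
        have := (List.all_eq_true.mp hall) w hwmem
        subst hwip
        simp at this
      have hanyf : ¬ ss.any (fun s => s == "failed") = true := by
        intro hany
        rcases List.any_eq_true.mp hany with ⟨s, hsmem, hs⟩
        have := hubs s hsmem
        rw [beq_iff_eq.mp hs] at this
        simp [pvRankB] at this
      have hanyi : ss.any (fun s => s == "in_progress") = true :=
        List.any_eq_true.mpr ⟨w, hwmem, by simp [hwip]⟩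
      rw [if_neg hall1, if_neg hall2, if_neg hanyf, if_pos hanyi]; rfl
    · -- M = 4 : some "failed"
      rcases hmem with h | h
      · omega
      rcases List.mem_map.mp h with ⟨w, hwmem, hw⟩
      have hwf : w = "failed" := (pvRank_eq_four w).mp hw
      have hall1 : ¬ ss.all (fun s => s == "approved") = true := by
        intro hall
        have := (List.all_eq_true.mp hall) w hwmem
        rw [beq_iff_eq.mp this] at hwf; simp at hwf
      have hall2 : ¬ ss.all (fun s => s == "generated" || s == "approved") = true := by
        intro hall
        have := (List.all_eq_true.mp hall) w hwmem
        subst hwf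
        simp at this
      have hanyf : ss.any (fun s => s == "failed") = true :=
        List.any_eq_true.mpr ⟨w, hwmem, by simp [hwf]⟩
      rw [if_neg hall1, if_neg hall2, if_pos hanyf]; rfl
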